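-- pv_equiv track=rewrite | github.com/aubio/aubio | python/aubio/onsetcompare.py | onset_roc
-- ===== SOURCE A (Python) =====
-- def onset_roc(la, lb, eps):
--     """ thanks to nicolas wack for the rewrite"""
--     """ compute differences between two lists """
--     """ feature: scalable to huge lists """
--     n, m = len(la), len(lb)
--     if m == 0 :
--         return 0,0,0,n,0
--     missed, bad = 0, 0
--     # find missed ones first
--     for x in la:
--         correspond = 0
--         for y in lb:
--             if abs(x-y) <= eps:
--                 correspond += 1
--         if correspond == 0:
--             missed += 1
--     # then look for bad ones
--     for y in lb:
--         correspond = 0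
--         for x in la:
--             if abs(x-y) <= eps:
--                correspond += 1
--         if correspond == 0:
--             bad += 1
--     ok    = n - missed
--     hits  = m - bad
--     total = n
--     return ok,bad,missed,total,hits
-- ===== SOURCE B (Python) =====
-- def _bisect_left(s, t):
--     # hand-written bisect_left (stdlib 'bisect' not importable here: A imports nothing)
--     lo, hi = 0, len(s)
--     while lo < hi:
--         mid = (lo + hi) // 2
--         if s[mid] < t:
--             lo = mid + 1
--         else:
--             hi = mid
--     return lo
--
-- def _has_near(s, x, eps):
--     # s sorted ascending: is there an element of s within eps of x?
--     i = _bisect_left(s, x - eps)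
--     return i < len(s) and s[i] <= x + eps
--
-- def onset_roc(la, lb, eps):
--     n, m = len(la), len(lb)
--     if m == 0:
--         return 0, 0, 0, n, 0
--     sa, sb = sorted(la), sorted(lb)
--     missed = sum(1 for x in la if not _has_near(sb, x, eps))
--     bad = sum(1 for y in lb if not _has_near(sa, y, eps))
--     return n - missed, bad, missed, n, m - bad
-- ===== Notes on version B (the rewrite author's own statement) =====
-- stated objective: faster
-- what changed: Replaces the two quadratic nested membership scans by sorting each list once and binary-searching (bisect_left) the sorted other list for a neighbor within eps.
import Mathlib
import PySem

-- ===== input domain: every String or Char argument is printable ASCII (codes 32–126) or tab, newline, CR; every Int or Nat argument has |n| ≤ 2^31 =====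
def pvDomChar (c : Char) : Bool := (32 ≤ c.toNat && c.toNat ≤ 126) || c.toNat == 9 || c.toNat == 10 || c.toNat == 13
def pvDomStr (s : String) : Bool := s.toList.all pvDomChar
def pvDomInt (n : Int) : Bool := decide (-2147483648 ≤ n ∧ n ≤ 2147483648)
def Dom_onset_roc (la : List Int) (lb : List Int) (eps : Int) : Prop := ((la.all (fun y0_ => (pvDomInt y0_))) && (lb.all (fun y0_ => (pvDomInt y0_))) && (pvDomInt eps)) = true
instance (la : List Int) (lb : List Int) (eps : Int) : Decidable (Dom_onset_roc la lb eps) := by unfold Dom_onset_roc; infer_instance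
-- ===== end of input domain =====

-- B replaces A's two O(n*m) nested scans by sorting each list once and binary-searching
-- the sorted other list for a neighbor within eps (asymptotically faster; return value only).

-- ===== PORT A =====
def onset_roc (la : List Int) (lb : List Int) (eps : Int) : List Int :=
  let n : Int := la.length
  let m : Int := lb.length
  if lb.length == 0 then [0, 0, 0, n, 0]
  else
    let missed : Int := la.foldl (fun missed x =>
      let correspond : Int := lb.foldl (fun c y => if |x - y| ≤ eps then c + 1 else c) 0
      if correspond = 0 then missed + 1 else missed) 0
    let bad : Int := lb.foldl (fun bad y =>
      let correspond : Int := la.foldl (fun c x => if |x - y| ≤ eps then c + 1 else c) 0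
      if correspond = 0 then bad + 1 else bad) 0
    let ok := n - missed
    let hits := m - bad
    [ok, bad, missed, n, hits]

-- ===== PORT B =====
-- _has_near from Source B; its hand-written _bisect_left loop is exactly PySem.List.bisectLeft
def hasNear (s : List Int) (x : Int) (eps : Int) : Bool :=
  let i := PySem.List.bisectLeft s (x - eps)
  decide (i < s.length) && decide (s.getD i 0 ≤ x + eps)

def onset_roc_alt (la : List Int) (lb : List Int) (eps : Int) : List Int :=
  let n : Int := la.length
  let m : Int := lb.length
  if lb.length == 0 then [0, 0, 0, n, 0]
  else
    let sa := PySem.List.sorted la (fun v => v)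
    let sb := PySem.List.sorted lb (fun v => v)
    let missed : Int := la.countP (fun x => !hasNear sb x eps)
    let bad : Int := lb.countP (fun y => !hasNear sa y eps)
    [n - missed, bad, missed, n, m - bad]

-- ===== PRECONDITION & SPEC =====
def Spec_onset_roc (la : List Int) (lb : List Int) (eps : Int) (out : List Int) : Prop := out = onset_roc_alt la lb eps
instance (la : List Int) (lb : List Int) (eps : Int) (out : List Int) : Decidable (Spec_onset_roc la lb eps out) := by unfold Spec_onset_roc; infer_instance

-- ===== CLAIM (what is proved, stated in full; the proofs are below) =====
def Claim_equal_onset_roc : Prop := ∀ (la : List Int) (lb : List Int) (eps : Int), Dom_onset_roc la lb eps → Spec_onset_roc la lb eps (onset_roc la lb eps)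

-- ===== LEMMAS AND PROOFS =====

-- In a sorted list, the bisect-based check is existence of an element within eps
theorem hasNear_iff (s : List Int) (x eps : Int) (hs : s.Pairwise (· ≤ ·)) :
    hasNear s x eps = true ↔ ∃ y ∈ s, |x - y| ≤ eps := by
  obtain ⟨hle, hlt, hge⟩ := PySem.List.bisectLeft_spec s (x - eps) hs
  unfold hasNear
  simp only [Bool.and_eq_true, decide_eq_true_eq]
  constructor
  · rintro ⟨hi, hv⟩
    refine ⟨s.getD (PySem.List.bisectLeft s (x - eps)) 0, ?_, ?_⟩
    · rw [List.getD_eq_getElem s 0 hi]; exact List.getElem_mem hi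
    · have := hge (PySem.List.bisectLeft s (x - eps)) hi le_rfl
      rw [List.getD_eq_getElem s 0 hi] at hv ⊢
      rw [abs_le]; omega
  · rintro ⟨y, hy, habs⟩
    rw [abs_le] at habs
    obtain ⟨j, hj, rfl⟩ := List.mem_iff_getElem.mp hy
    have hjge : PySem.List.bisectLeft s (x - eps) ≤ j := by
      by_contra hcon
      have := hlt j hj (by omega)
      omega
    have hi : PySem.List.bisectLeft s (x - eps) < s.length := lt_of_le_of_lt hjge hj
    refine ⟨hi, ?_⟩
    rw [List.getD_eq_getElem s 0 hi]
    rcases eq_or_lt_of_le hjge with h | h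
    · simp only [h]; omega
    · have := List.pairwise_iff_getElem.mp hs _ j hi hj h
      omega

-- A's inner counting loop is countP
theorem inner_count (l : List Int) (p : Int → Prop) [DecidablePred p] :
    l.foldl (fun c y => if p y then c + 1 else c) (0 : Int)
      = (l.countP (fun y => decide (p y)) : Int) := by
  have := PySem.List.foldl_count_if (fun y => decide (p y)) l 0
  simpa using this

-- A's outer counting loop is countP of "inner count is zero"
theorem outer_count (l : List Int) (cnt : Int → Int) :
    l.foldl (fun acc x => if cnt x = 0 then acc + 1 else acc) (0 : Int)
      = (l.countP (fun x => decide (cnt x = 0)) : Int) := by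
  have := PySem.List.foldl_count_if (fun x => decide (cnt x = 0)) l 0
  simpa using this

-- the per-element predicates of A and B agree
theorem pred_eq (other : List Int) (eps : Int) (x : Int) :
    decide ((other.foldl (fun c y => if |x - y| ≤ eps then c + 1 else c) (0 : Int)) = 0)
      = !hasNear (PySem.List.sorted other (fun v => v)) x eps := by
  rw [inner_count]
  have hiff : hasNear (PySem.List.sorted other (fun v => v)) x eps = true
      ↔ ∃ y ∈ other, |x - y| ≤ eps := by
    rw [hasNear_iff _ _ _ (PySem.List.sorted_pairwise other (fun v => v))]
    constructor
    · rintro ⟨y, hy, h⟩; exact ⟨y, (PySem.List.mem_sorted _ _ _ _).mp hy, h⟩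
    · rintro ⟨y, hy, h⟩; exact ⟨y, (PySem.List.mem_sorted _ _ _ _).mpr hy, h⟩
  have hcount : other.countP (fun y => decide (|x - y| ≤ eps)) = 0
      ↔ ∀ y ∈ other, ¬ |x - y| ≤ eps := by
    rw [List.countP_eq_zero]; simp
  by_cases hn : hasNear (PySem.List.sorted other (fun v => v)) x eps = true
  · rw [hn]
    simp only [Bool.not_true, decide_eq_false_iff_not]
    intro hc
    have hc' : other.countP (fun y => decide (|x - y| ≤ eps)) = 0 := by exact_mod_cast hc
    obtain ⟨y, hy, hab⟩ := hiff.mp hn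
    exact (hcount.mp hc' y hy) hab
  · simp only [Bool.not_eq_true] at hn
    rw [hn]
    simp only [Bool.not_false, decide_eq_true_eq]
    have hno : ¬ ∃ y ∈ other, |x - y| ≤ eps := fun hex => by
      simp [hiff.mpr hex] at hn
    have hc' : other.countP (fun y => decide (|x - y| ≤ eps)) = 0 :=
      hcount.mpr (fun y hy hab => hno ⟨y, hy, hab⟩)
    exact_mod_cast hc'

theorem count_eq (src other : List Int) (eps : Int) :
    src.foldl (fun acc x =>
        if (other.foldl (fun c y => if |x - y| ≤ eps then c + 1 else c) (0 : Int)) = 0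
        then acc + 1 else acc) (0 : Int)
      = (src.countP (fun x => !hasNear (PySem.List.sorted other (fun v => v)) x eps) : Int) := by
  rw [outer_count]
  congr 1
  exact List.countP_congr (fun x _ => by rw [pred_eq other eps x])

-- the "bad" loop has the absolute value written the other way round
theorem count_eq' (la lb : List Int) (eps : Int) :
    lb.foldl (fun acc y =>
        if (la.foldl (fun c x => if |x - y| ≤ eps then c + 1 else c) (0 : Int)) = 0
        then acc + 1 else acc) (0 : Int)
      = (lb.countP (fun y => !hasNear (PySem.List.sorted la (fun v => v)) y eps) : Int) := by
  have h : ∀ y : Int, (fun (c : Int) (x : Int) => if |x - y| ≤ eps then c + 1 else c)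
      = (fun (c : Int) (x : Int) => if |y - x| ≤ eps then c + 1 else c) := by
    intro y; funext c x; rw [abs_sub_comm]
  simp only [h]
  exact count_eq lb la eps

-- ===== VERDICT (by name: the statement is the Claim_ definition above) =====
theorem onset_roc_spec : Claim_equal_onset_roc := by
  intro la lb eps _
  unfold Spec_onset_roc onset_roc onset_roc_alt
  by_cases h : lb.length = 0
  · simp [h]
  · simp only [beq_iff_eq, h, if_false]
    rw [count_eq la lb eps, count_eq' la lb eps]
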